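-- pv_equiv track=rewrite | github.com/nayuki/Project-Euler-solutions | python/p182.py | count_all_unconcealed
-- ===== SOURCE A (Python) =====
-- import math
--
-- def count_all_unconcealed(prime):
-- 	result = []
-- 	for e in range(prime - 1):
-- 		if math.gcd(e, prime - 1) == 1:
-- 			result.append(count_unconcealed(prime, e))
-- 		else:
-- 			result.append(10**20)  # Sentinel
-- 	return result
--
-- def count_unconcealed(modulus, e):
-- 	result = 0
-- 	for m in range(modulus):
-- 		if pow(m, e, modulus) == m:
-- 			result += 1
-- 	return result
-- ===== SOURCE B (Python) =====
-- import math
--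
-- # Same counts, but instead of one modular exponentiation per (e, m) pair, keep a
-- # vector powers with powers[m] == m**e % prime and advance it by one multiplication
-- # per entry when e increases.
-- def count_all_unconcealed(prime):
--     n = prime - 1
--     result = []
--     if n <= 0:
--         return result
--     powers = [1 % prime] * prime          # powers[m] == m**e % prime, starting at e == 0
--     for e in range(n):
--         if math.gcd(e, n) == 1:
--             result.append(sum(v == m for m, v in enumerate(powers)))
--         else:
--             result.append(10**20)
--         powers = [v * m % prime for m, v in enumerate(powers)]
--     return result
-- ===== Notes on version B (the rewrite author's own statement) =====
-- stated objective: faster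
-- what changed: Instead of recomputing pow(m, e, prime) from scratch for every pair (e, m), B maintains a vector powers[m] = m^e mod prime across the exponent loop and advances it by one multiplication per entry, counting fixed points by a direct scan of that vector.
import Mathlib
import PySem

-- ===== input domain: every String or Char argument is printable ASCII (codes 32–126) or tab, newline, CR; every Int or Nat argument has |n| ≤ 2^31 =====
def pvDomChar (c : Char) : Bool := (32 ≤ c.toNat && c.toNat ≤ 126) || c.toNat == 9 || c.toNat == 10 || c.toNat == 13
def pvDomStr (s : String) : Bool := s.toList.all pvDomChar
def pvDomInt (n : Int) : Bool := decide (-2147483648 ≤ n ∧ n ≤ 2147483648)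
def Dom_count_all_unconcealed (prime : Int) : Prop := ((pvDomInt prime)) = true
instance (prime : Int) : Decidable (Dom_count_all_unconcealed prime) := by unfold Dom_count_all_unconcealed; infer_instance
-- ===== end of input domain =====

-- B keeps a vector powers[m] = m^e mod prime across the exponent loop (one multiplication
-- per entry per step) instead of one modular exponentiation per (e, m) pair.


-- ===== PORT A =====
-- helper: count_unconcealed(modulus, e).  In A, e is always drawn from range(prime - 1),
-- hence nonnegative; pow(m, e, modulus) is PySem.Int.powMod with the Nat exponent e.toNat.
def count_unconcealed (modulus : Int) (e : Int) : Int :=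
  (PySem.List.pyRange 0 modulus 1).foldl
    (fun result m => if PySem.Int.powMod m e.toNat modulus = m then result + 1 else result) 0

def count_all_unconcealed (prime : Int) : List Int :=
  (PySem.List.pyRange 0 (prime - 1) 1).foldl
    (fun result e =>
      if Int.gcd e (prime - 1) = 1 then result ++ [count_unconcealed prime e]
      else result ++ [10 ^ 20]) []

-- ===== PORT B =====
-- sum(v == m for m, v in enumerate(powers))
def pvCountFix (powers : List Int) : Int :=
  ((PySem.List.enumerate powers).map (fun p => if p.2 = p.1 then (1 : Int) else 0)).sum

-- [v * m % prime for m, v in enumerate(powers)]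
def pvUpdate (prime : Int) (powers : List Int) : List Int :=
  (PySem.List.enumerate powers).map (fun p => PySem.Int.mod (p.2 * p.1) prime)

def count_all_unconcealed_alt (prime : Int) : List Int :=
  if prime - 1 ≤ 0 then []
  else
    ((PySem.List.pyRange 0 (prime - 1) 1).foldl
      (fun (st : List Int × List Int) e =>
        ((if Int.gcd e (prime - 1) = 1 then st.1 ++ [pvCountFix st.2] else st.1 ++ [10 ^ 20]),
         pvUpdate prime st.2))
      ([], List.replicate prime.toNat (PySem.Int.mod 1 prime))).1

-- ===== PRECONDITION & SPEC =====
def Spec_count_all_unconcealed (prime : Int) (out : List Int) : Prop := out = count_all_unconcealed_alt prime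
instance (prime : Int) (out : List Int) : Decidable (Spec_count_all_unconcealed prime out) := by unfold Spec_count_all_unconcealed; infer_instance

-- ===== CLAIM (what is proved, stated in full; the proofs are below) =====
def Claim_equal_count_all_unconcealed : Prop := ∀ (prime : Int), Dom_count_all_unconcealed prime → Spec_count_all_unconcealed prime (count_all_unconcealed prime)

-- ===== LEMMAS AND PROOFS =====

-- the vector B maintains: entry m holds m^a mod prime
def powVec (prime : Int) (a : ℕ) : List Int :=
  (List.range prime.toNat).map (fun m : ℕ => PySem.Int.mod ((m : Int) ^ a) prime)

lemma enum_map_range {α : Type} (f : ℕ → α) (n : ℕ) :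
    PySem.List.enumerate ((List.range n).map f)
      = (List.range n).map (fun (k : ℕ) => ((k : Int), f k)) := by
  induction n with
  | zero => simp [PySem.List.enumerate_nil]
  | succ n ih =>
    rw [List.range_succ, List.map_append, List.map_append,
      PySem.List.enumerate_append, ih]
    simp [PySem.List.enumerate_cons, PySem.List.enumerate_nil]

lemma powVec_zero (prime : Int) :
    List.replicate prime.toNat (PySem.Int.mod 1 prime) = powVec prime 0 := by
  rw [powVec]
  simp

lemma pvUpdate_powVec (prime : Int) (hp : 0 < prime) (a : ℕ) :
    pvUpdate prime (powVec prime a) = powVec prime (a + 1) := by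
  rw [pvUpdate, powVec, powVec, enum_map_range, List.map_map]
  apply List.map_congr_left
  intro k _
  simp only [Function.comp]
  rw [PySem.Int.mod_eq_emod_of_pos hp, PySem.Int.mod_eq_emod_of_pos hp,
    PySem.Int.mod_eq_emod_of_pos hp, pow_succ]
  conv_rhs => rw [Int.mul_emod]
  rw [Int.mul_emod, Int.emod_emod_of_dvd _ dvd_rfl]

lemma pvCountFix_powVec (prime : Int) (e : Int) :
    pvCountFix (powVec prime e.toNat) = count_unconcealed prime e := by
  have hL : pvCountFix (powVec prime e.toNat)
      = ((List.range prime.toNat).countP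
          (fun k : ℕ => decide (PySem.Int.mod ((k : Int) ^ e.toNat) prime = (k : Int))) : Int) := by
    rw [pvCountFix, powVec, enum_map_range, List.map_map]
    simpa [Function.comp] using
      PySem.List.sum_map_ite_one_zero
        (fun k : ℕ => decide (PySem.Int.mod ((k : Int) ^ e.toNat) prime = (k : Int)))
        (List.range prime.toNat)
  have hR : count_unconcealed prime e
      = ((List.range prime.toNat).countP
          (fun k : ℕ => decide (PySem.Int.mod ((k : Int) ^ e.toNat) prime = (k : Int))) : Int) := by
    rw [count_unconcealed, PySem.List.foldl_ite_add_one
      (p := fun m : Int => PySem.Int.powMod m e.toNat prime = m), zero_add,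
      PySem.List.pyRange_one, List.countP_map, sub_zero]
    congr 1
    apply List.countP_congr
    intro k _
    simp [Function.comp, PySem.Int.powMod]
  rw [hL, hR]

-- invariant of B's fold: the powers vector always holds the current exponent's powers
lemma alt_loop_eq (prime : Int) (hp : 1 < prime) :
    ∀ (t : ℕ) (a : Int) (acc : List Int), 0 ≤ a → a + t = prime - 1 →
    ((PySem.List.pyRange a (prime - 1) 1).foldl
      (fun (st : List Int × List Int) e =>
        ((if Int.gcd e (prime - 1) = 1 then st.1 ++ [pvCountFix st.2] else st.1 ++ [10 ^ 20]),
         pvUpdate prime st.2))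
      (acc, powVec prime a.toNat)).1
      = acc ++ (PySem.List.pyRange a (prime - 1) 1).map
          (fun e => if Int.gcd e (prime - 1) = 1 then count_unconcealed prime e else 10 ^ 20) := by
  intro t
  induction t with
  | zero =>
    intro a acc ha hat
    have : PySem.List.pyRange a (prime - 1) 1 = [] := by
      rw [PySem.List.pyRange_one]
      have : (prime - 1 - a).toNat = 0 := by omega
      rw [this]; rfl
    simp [this]
  | succ t ih =>
    intro a acc ha hat
    have hlt : a < prime - 1 := by omega
    rw [PySem.List.pyRange_one_cons hlt]
    simp only [List.foldl_cons, List.map_cons]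
    rw [pvCountFix_powVec prime a, pvUpdate_powVec prime (by omega) a.toNat,
      show a.toNat + 1 = (a + 1).toNat by omega]
    rw [ih (a + 1) _ (by omega) (by omega)]
    split_ifs <;> simp

theorem count_all_unconcealed_spec : Claim_equal_count_all_unconcealed := by
  intro prime _
  unfold Spec_count_all_unconcealed
  by_cases hp : prime - 1 ≤ 0
  · have hempty : PySem.List.pyRange 0 (prime - 1) 1 = [] := by
      rw [PySem.List.pyRange_one]
      have : (prime - 1 - 0).toNat = 0 := by omega
      rw [this]; rfl
    rw [count_all_unconcealed, count_all_unconcealed_alt, if_pos hp, hempty]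
    rfl
  · have hp1 : 1 < prime := by omega
    rw [count_all_unconcealed, count_all_unconcealed_alt, if_neg hp]
    have hbody : (fun (result : List Int) (e : Int) =>
        if Int.gcd e (prime - 1) = 1 then result ++ [count_unconcealed prime e] else result ++ [10 ^ 20])
        = fun result e => result ++ [if Int.gcd e (prime - 1) = 1 then count_unconcealed prime e else 10 ^ 20] := by
      funext result e; split_ifs <;> rfl
    rw [hbody, PySem.List.foldl_append_singleton_eq_map, List.nil_append]
    rw [powVec_zero prime, show (0 : ℕ) = (0 : Int).toNat from rfl]
    rw [alt_loop_eq prime hp1 (prime - 1).toNat 0 [] le_rfl (by omega), List.nil_append]
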